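-- pv_equiv track=rewrite | github.com/manwar/perlweeklychallenge-club | challenge-345/lubos-kolouch/python/ch-2.py | last_visitor
-- ===== SOURCE A (Python) =====
-- from collections.abc import Iterable, Sequence
--
-- def last_visitor(ints: Sequence[int]) -> list[int]:
--     """Return the lookups requested by ``-1`` entries in ``ints``.
--
--     Positive integers are stored with the newest at index 0. For a run of
--     ``-1`` values, the ``x``-th ``-1`` retrieves the ``x``-th element of the
--     stored list (if present) or ``-1`` otherwise.
--     """
--     seen: list[int] = []
--     answers: list[int] = []
--     neg_run = 0
--
--     for value in ints:
--         if value == -1: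
--             answers.append(seen[neg_run] if neg_run < len(seen) else -1)
--             neg_run += 1
--             continue
--
--         seen.insert(0, value)
--         neg_run = 0
--
--     return answers
-- ===== SOURCE B (Python) =====
-- from itertools import groupby
--
-- def last_visitor(ints):
--     """Run-based version: split the stream into alternating groups of stored
--     values and -1 queries with groupby, handling each run in bulk."""
--     seen = []
--     answers = []
--     for is_query, group in groupby(ints, key=lambda v: v == -1):
--         run = list(group)
--         if is_query:
--             answers.extend(seen[i] if i < len(seen) else -1 for i in range(len(run)))
--         else:
--             seen = run[::-1] + seen
--     return answers
-- ===== Notes on version B (the rewrite author's own statement) =====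
-- stated objective: faster
-- what changed: B splits the input into maximal runs via itertools.groupby on (v == -1) and handles each run in bulk (one reversed-slice concat per stored run, one indexed comprehension per query run), instead of A's per-element loop with a reset counter and a per-element insert(0).
import Mathlib
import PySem

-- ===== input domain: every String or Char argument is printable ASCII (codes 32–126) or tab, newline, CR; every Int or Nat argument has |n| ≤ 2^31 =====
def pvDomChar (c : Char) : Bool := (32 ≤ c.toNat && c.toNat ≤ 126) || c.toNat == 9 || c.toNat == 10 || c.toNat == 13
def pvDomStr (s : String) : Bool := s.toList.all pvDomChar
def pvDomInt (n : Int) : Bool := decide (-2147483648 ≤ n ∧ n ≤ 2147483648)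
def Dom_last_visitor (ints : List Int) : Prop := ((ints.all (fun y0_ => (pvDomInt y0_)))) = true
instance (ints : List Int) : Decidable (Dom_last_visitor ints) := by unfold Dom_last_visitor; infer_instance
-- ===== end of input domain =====

-- B processes the input in runs (groupby on v == -1) instead of per element with a reset counter; same values, different decomposition.

-- ===== PORT A =====
-- the for-loop of A as structural recursion over the same state (seen, answers, neg_run)
def lvA (seen answers : List Int) (neg : Nat) : List Int → List Int
  | [] => answers
  | v :: vs =>
    if v = -1 then
      lvA seen (answers ++ [if neg < seen.length then seen.getD neg (-1) else -1]) (neg + 1) vs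
    else
      lvA (v :: seen) answers 0 vs

def last_visitor (ints : List Int) : List Int := lvA [] [] 0 ints

-- ===== PORT B =====
-- one groupby step = take the maximal run (takeWhile/dropWhile on v == -1) and handle it in bulk
def lvB (seen : List Int) : List Int → List Int
  | [] => []
  | x :: xs =>
    if x = -1 then
      let run := (x :: xs).takeWhile (fun v => v == -1)
      let rest := (x :: xs).dropWhile (fun v => v == -1)
      ((List.range run.length).map (fun i => if i < seen.length then seen.getD i (-1) else -1))
        ++ lvB seen rest
    else
      let run := (x :: xs).takeWhile (fun v => !(v == -1))
      let rest := (x :: xs).dropWhile (fun v => !(v == -1))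
      lvB (run.reverse ++ seen) rest
termination_by l => l.length
decreasing_by
  · simp_all
    exact List.length_dropWhile_le _ _
  · simp_all
    exact List.length_dropWhile_le _ _

def last_visitor_alt (ints : List Int) : List Int := lvB [] ints

-- ===== PRECONDITION & SPEC =====
def Spec_last_visitor (ints : List Int) (out : List Int) : Prop := out = last_visitor_alt ints
instance (ints : List Int) (out : List Int) : Decidable (Spec_last_visitor ints out) := by unfold Spec_last_visitor; infer_instance

-- ===== CLAIM (what is proved, stated in full; the proofs are below) =====
def Claim_equal_last_visitor : Prop := ∀ (ints : List Int), Dom_last_visitor ints → Spec_last_visitor ints (last_visitor ints)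

-- ===== LEMMAS AND PROOFS =====

-- the guarded lookup is just getD with default -1
theorem getD_guard (seen : List Int) (i : Nat) :
    (if i < seen.length then seen.getD i (-1) else -1) = seen.getD i (-1) := by
  split
  · rfl
  · rw [List.getD_eq_default]; omega

-- a run of stored values is folded into seen front-to-back
theorem lvA_store (t : List Int) : ∀ (seen ans r : List Int),
    (∀ v ∈ t, v ≠ -1) → lvA seen ans 0 (t ++ r) = lvA (t.reverse ++ seen) ans 0 r := by
  induction t with
  | nil => intro seen ans r _; simp
  | cons v vs ih =>
    intro seen ans r h
    have hv : v ≠ -1 := h v (by simp)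
    simp only [List.cons_append, lvA, if_neg hv]
    rw [ih (v :: seen) ans r (fun w hw => h w (by simp [hw]))]
    simp

-- a run of m queries appends m lookups and bumps neg by m
theorem lvA_neg (m : Nat) : ∀ (seen ans r : List Int) (neg : Nat),
    lvA seen ans neg (List.replicate m (-1) ++ r)
      = lvA seen (ans ++ (List.range m).map (fun i => seen.getD (neg + i) (-1))) (neg + m) r := by
  induction m with
  | zero => intro seen ans r neg; simp
  | succ m ih =>
    intro seen ans r neg
    simp only [List.replicate_succ, List.cons_append, lvA, getD_guard]
    rw [ih seen _ r (neg + 1)]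
    rw [List.range_succ_eq_map, List.map_cons, List.map_map]
    have hm : ((fun i => seen.getD (neg + i) (-1)) ∘ Nat.succ)
        = (fun i => seen.getD (neg + 1 + i) (-1)) := by
      funext i
      simp only [Function.comp_apply]
      have h : neg + Nat.succ i = neg + 1 + i := by omega
      rw [h]
    rw [hm]
    have hneg : neg + 1 + m = neg + (m + 1) := by omega
    rw [hneg]
    simp

theorem takeWhile_neg_replicate (l : List Int) :
    l.takeWhile (fun v => v == -1)
      = List.replicate (l.takeWhile (fun v => v == -1)).length (-1) := by
  rw [List.eq_replicate_iff]
  refine ⟨rfl, fun b hb => ?_⟩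
  have := List.mem_takeWhile_imp hb
  simpa using this

theorem lvA_eq_lvB (l : List Int) : ∀ (seen ans : List Int),
    lvA seen ans 0 l = ans ++ lvB seen l := by
  induction hn : l.length using Nat.strong_induction_on generalizing l with
  | _ n ih =>
  intro seen ans
  match l with
  | [] => simp [lvA, lvB]
  | x :: xs =>
    by_cases hx : x = -1
    · rw [lvB]
      simp only [if_pos hx]
      have hsplit := List.takeWhile_append_dropWhile (p := fun v : Int => v == -1) (l := x :: xs)
      set t := (x :: xs).takeWhile (fun v => v == -1) with ht
      set r := (x :: xs).dropWhile (fun v => v == -1) with hr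
      have hrep : t = List.replicate t.length (-1) := takeWhile_neg_replicate _
      have hlt : r.length < n := by
        have : r.length < (x :: xs).length := by
          rw [hr, List.dropWhile_cons, if_pos (by simp [hx])]
          exact Nat.lt_succ_of_le (List.length_dropWhile_le _ _)
        omega
      have key : lvA seen ans 0 (x :: xs)
          = lvA seen (ans ++ (List.range t.length).map (fun i => seen.getD i (-1))) t.length r := by
        conv_lhs => rw [← hsplit, hrep]
        rw [lvA_neg]
        simp only [Nat.zero_add]
      rw [key]
      have hmap : (List.range t.length).map (fun i => if i < seen.length then seen.getD i (-1) else -1)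
          = (List.range t.length).map (fun i => seen.getD i (-1)) := by
        refine List.map_congr_left ?_
        intro i _
        exact getD_guard seen i
      rw [hmap, ← List.append_assoc]
      match r, hlt with
      | [], _ => simp [lvA, lvB]
      | w :: ws, hlt =>
        have hw : w ≠ -1 := by
          have := List.head?_dropWhile_not (p := fun v : Int => v == -1) (l := x :: xs)
          rw [← hr] at this
          simpa using this
        have step : lvA seen (ans ++ (List.range t.length).map (fun i => seen.getD i (-1))) t.length (w :: ws)
            = lvA seen (ans ++ (List.range t.length).map (fun i => seen.getD i (-1))) 0 (w :: ws) := by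
          simp [lvA, if_neg hw]
        rw [step, ih _ hlt _ rfl]
    · rw [lvB]
      simp only [if_neg hx]
      have hsplit := List.takeWhile_append_dropWhile (p := fun v : Int => !(v == -1)) (l := x :: xs)
      set t := (x :: xs).takeWhile (fun v => !(v == -1)) with ht
      set r := (x :: xs).dropWhile (fun v => !(v == -1)) with hr
      have hlt : r.length < n := by
        have : r.length < (x :: xs).length := by
          rw [hr, List.dropWhile_cons, if_pos (by simp [hx])]
          exact Nat.lt_succ_of_le (List.length_dropWhile_le _ _)
        omega
      have hmem : ∀ v ∈ t, v ≠ -1 := by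
        intro v hv
        have := List.mem_takeWhile_imp hv
        simpa using this
      conv_lhs => rw [← hsplit]
      rw [lvA_store t seen ans r hmem, ih _ hlt _ rfl]

-- ===== VERDICT (by name: the statement is the Claim_ definition above) =====
theorem last_visitor_spec : Claim_equal_last_visitor := by
  intro ints _
  unfold Spec_last_visitor last_visitor last_visitor_alt
  simpa using lvA_eq_lvB ints [] []
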